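-- pv_equiv track=rewrite | github.com/hungngo2/cs445-final-project-retrieval | src/officeqa_retrieval/dataset.py | _align_sources
-- ===== SOURCE A (Python) =====
-- def _align_sources(source_files: tuple[str, ...], source_urls: tuple[str, ...]) -> list[tuple[str | None, str | None]]:
--     if not source_files and not source_urls:
--         return []
--     if len(source_files) == len(source_urls):
--         return list(zip(source_files, source_urls, strict=True))
--     if len(source_files) == 1 and source_urls:
--         return [(source_files[0], source_url) for source_url in source_urls]
--     if len(source_urls) == 1 and source_files:
--         return [(source_file, source_urls[0]) for source_file in source_files]
--
--     count = max(len(source_files), len(source_urls))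
--     aligned: list[tuple[str | None, str | None]] = []
--     for index in range(count):
--         source_file = source_files[index] if index < len(source_files) else None
--         source_url = source_urls[index] if index < len(source_urls) else None
--         aligned.append((source_file, source_url))
--     return aligned
-- ===== SOURCE B (Python) =====
-- _MISSING = object()
--
-- def _align_sources(source_files, source_urls):
--     # One fill value per side: the broadcast singleton, else None; then a single
--     # simultaneous walk of both sequences (a zip-longest with per-side fills).
--     ffill = source_files[0] if len(source_files) == 1 and source_urls else None
--     ufill = source_urls[0] if len(source_urls) == 1 and source_files else None
--     it_f = iter(source_files)
--     it_u = iter(source_urls)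
--     out = []
--     while True:
--         f = next(it_f, _MISSING)
--         u = next(it_u, _MISSING)
--         if f is _MISSING and u is _MISSING:
--             return out
--         out.append((f if f is not _MISSING else ffill,
--                     u if u is not _MISSING else ufill))
-- ===== Notes on version B (the rewrite author's own statement) =====
-- stated objective: alternative
-- what changed: B precomputes one broadcast fill value per side and then produces all pairs in a single simultaneous walk of both sequences (a zip-longest with per-side fills), replacing A's four-way branch dispatch with per-case list constructions.
import Mathlib
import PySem

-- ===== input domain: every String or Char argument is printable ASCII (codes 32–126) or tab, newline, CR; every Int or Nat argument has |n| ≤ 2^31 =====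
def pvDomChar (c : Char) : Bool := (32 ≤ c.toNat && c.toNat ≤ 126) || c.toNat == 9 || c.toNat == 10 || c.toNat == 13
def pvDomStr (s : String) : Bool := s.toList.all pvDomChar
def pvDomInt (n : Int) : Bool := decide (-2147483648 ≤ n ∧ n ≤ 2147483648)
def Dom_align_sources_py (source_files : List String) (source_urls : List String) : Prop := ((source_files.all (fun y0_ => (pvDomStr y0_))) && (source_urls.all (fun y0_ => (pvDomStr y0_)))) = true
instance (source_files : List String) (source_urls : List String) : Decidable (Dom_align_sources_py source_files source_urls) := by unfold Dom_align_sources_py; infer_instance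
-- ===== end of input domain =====

-- B precomputes one broadcast fill value per side and emits the pairs in a single
-- simultaneous recursion over both lists (no branch dispatch, no column building); same cost.

-- ===== PORT A =====
def align_sources_py (source_files : List String) (source_urls : List String) : List (Option String × Option String) :=
  if source_files = [] ∧ source_urls = [] then []
  else if source_files.length = source_urls.length then
    (source_files.zip source_urls).map (fun p => (some p.1, some p.2))
  else if source_files.length = 1 ∧ source_urls ≠ [] then
    source_urls.map (fun url => (PySem.List.pyGet? source_files 0, some url))
  else if source_urls.length = 1 ∧ source_files ≠ [] then
    source_files.map (fun file => (some file, PySem.List.pyGet? source_urls 0))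
  else
    (PySem.List.pyRange 0 (max source_files.length source_urls.length : Nat) 1).foldl
      (fun acc index =>
        acc ++ [((if index < (source_files.length : Int) then PySem.List.pyGet? source_files index else none),
                 (if index < (source_urls.length : Int) then PySem.List.pyGet? source_urls index else none))]) []

-- ===== PORT B =====
-- the inner `go` of Source B: simultaneous structural recursion on both lists
def align_sources_go (ffill ufill : Option String) : List String → List String → List (Option String × Option String)
  | [], [] => []
  | [], u :: us => (ffill, some u) :: align_sources_go ffill ufill [] us
  | f :: fs, [] => (some f, ufill) :: align_sources_go ffill ufill fs []
  | f :: fs, u :: us => (some f, some u) :: align_sources_go ffill ufill fs us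

def align_sources_py_alt (source_files : List String) (source_urls : List String) : List (Option String × Option String) :=
  let ffill := if source_files.length = 1 ∧ source_urls ≠ [] then PySem.List.pyGet? source_files 0 else none
  let ufill := if source_urls.length = 1 ∧ source_files ≠ [] then PySem.List.pyGet? source_urls 0 else none
  align_sources_go ffill ufill source_files source_urls

-- ===== PRECONDITION & SPEC =====
def Spec_align_sources_py (source_files : List String) (source_urls : List String) (out : List (Option String × Option String)) : Prop := out = align_sources_py_alt source_files source_urls
instance (source_files : List String) (source_urls : List String) (out : List (Option String × Option String)) : Decidable (Spec_align_sources_py source_files source_urls out) := by unfold Spec_align_sources_py; infer_instance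

-- ===== CLAIM (what is proved, stated in full; the proofs are below) =====
def Claim_equal_align_sources_py : Prop := ∀ (source_files : List String) (source_urls : List String), Dom_align_sources_py source_files source_urls → Spec_align_sources_py source_files source_urls (align_sources_py source_files source_urls)

-- ===== LEMMAS AND PROOFS =====

lemma go_nil_left (ff uf : Option String) (us : List String) :
    align_sources_go ff uf [] us = us.map (fun u => (ff, some u)) := by
  induction us with
  | nil => simp [align_sources_go]
  | cons u us ih => simp [align_sources_go, ih]

lemma go_nil_right (ff uf : Option String) (fs : List String) :
    align_sources_go ff uf fs [] = fs.map (fun f => (some f, uf)) := by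
  induction fs with
  | nil => simp [align_sources_go]
  | cons f fs ih => simp [align_sources_go, ih]

-- equal lengths: the fills are never consulted and go is the zip
lemma go_zip (ff uf : Option String) (fs us : List String) (h : fs.length = us.length) :
    align_sources_go ff uf fs us = (fs.zip us).map (fun p => (some p.1, some p.2)) := by
  induction fs generalizing us with
  | nil => cases us with
    | nil => simp [align_sources_go]
    | cons u us => simp at h
  | cons f fs ih => cases us with
    | nil => simp at h
    | cons u us =>
      simp at h
      simp [align_sources_go, ih us h]

-- with both fills none, go is the index-padded alignment A's fallback loop builds
lemma go_pad (fs us : List String) :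
    align_sources_go none none fs us =
      (List.range (max fs.length us.length)).map
        (fun i => ((if i < fs.length then fs[i]? else none),
                   (if i < us.length then us[i]? else none))) := by
  induction fs generalizing us with
  | nil =>
    rw [go_nil_left]
    apply List.ext_getElem
    · simp
    · intro i h1 h2
      simp at h1
      simp [h1]
  | cons f fs ih =>
    cases us with
    | nil =>
      rw [go_nil_right]
      apply List.ext_getElem
      · simp
      · intro i h1 h2
        simp only [List.getElem_map, List.getElem_range]
        simp at h1
        have hlt : i < (f :: fs).length := by simpa using Nat.lt_succ_of_le h1
        simp [List.getElem?_eq_getElem hlt]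
        exact h1
    | cons u us =>
      simp only [align_sources_go, List.length_cons]
      rw [ih us]
      rw [show max (fs.length + 1) (us.length + 1) = (max fs.length us.length) + 1 by omega]
      apply List.ext_getElem
      · simp
      · intro i h1 h2
        cases i with
        | zero => simp
        | succ j =>
          simp at h1
          simp

-- ===== VERDICT (by name: the statement is the Claim_ definition above) =====
theorem align_sources_py_spec : Claim_equal_align_sources_py := by
  intro f u _
  unfold Spec_align_sources_py align_sources_py align_sources_py_alt
  by_cases hboth : f = [] ∧ u = []
  · obtain ⟨hf, hu⟩ := hboth; subst hf; subst hu; simp [align_sources_go]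
  · rw [if_neg hboth]
    by_cases heq : f.length = u.length
    · rw [if_pos heq]
      exact (go_zip _ _ f u heq).symm
    · rw [if_neg heq]
      by_cases hbf : f.length = 1 ∧ u ≠ []
      · -- broadcast the single file
        have hbu : ¬ (u.length = 1 ∧ f ≠ []) := by
          rintro ⟨h1, _⟩; exact heq (hbf.1.trans h1.symm)
        rw [if_pos hbf]
        simp only [if_pos hbf, if_neg hbu]
        match f, hbf.1 with
        | [x], _ =>
          obtain ⟨u0, us, rfl⟩ := List.exists_cons_of_ne_nil hbf.2
          simp [align_sources_go, go_nil_left, PySem.List.pyGet?, PySem.List.pyIdx?]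
      · rw [if_neg hbf]
        simp only [if_neg hbf]
        by_cases hbu : u.length = 1 ∧ f ≠ []
        · -- broadcast the single url
          rw [if_pos hbu]
          simp only [if_pos hbu]
          match u, hbu.1 with
          | [y], _ =>
            obtain ⟨f0, fs, rfl⟩ := List.exists_cons_of_ne_nil hbu.2
            simp [align_sources_go, go_nil_right, PySem.List.pyGet?, PySem.List.pyIdx?]
        · -- fallback: both fills are None, go pads with None
          rw [if_neg hbu]
          simp only [if_neg hbu]
          rw [go_pad]
          rw [PySem.List.foldl_append_singleton_eq_map, List.nil_append,
            PySem.List.pyRange_zero_nat, List.map_map]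
          apply List.map_congr_left
          intro i hi
          simp [PySem.List.pyGet?_natCast]
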